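-- pv_equiv track=rewrite | github.com/d14405011-sudo/2026-python | weeks/week-10/solutions/1114405011/10235/test_q10235.py | brute_force_cycle_cover_count
-- ===== SOURCE A (Python) =====
-- from typing import List, Tuple
--
-- def brute_force_cycle_cover_count(grid: List[List[int]]) -> int:
--     """小尺寸暴力驗證：統計所有讓每個 1 格度數=2、每個 0 格度數=0 的邊配置數。"""
--     n = len(grid)
--     m = len(grid[0]) if n else 0
--
--     edges: List[Tuple[Tuple[int, int], Tuple[int, int]]] = []
--     for r in range(n):
--         for c in range(m):
--             if grid[r][c] != 1:
--                 continue
--             if c + 1 < m and grid[r][c + 1] == 1: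
--                 edges.append(((r, c), (r, c + 1)))
--             if r + 1 < n and grid[r + 1][c] == 1:
--                 edges.append(((r, c), (r + 1, c)))
--
--     ans = 0
--     for mask in range(1 << len(edges)):
--         deg = [[0] * m for _ in range(n)]
--         ok = True
--
--         for i, (a, b) in enumerate(edges):
--             if (mask >> i) & 1:
--                 ar, ac = a
--                 br, bc = b
--                 deg[ar][ac] += 1
--                 deg[br][bc] += 1
--                 if deg[ar][ac] > 2 or deg[br][bc] > 2:
--                     ok = False
--                     break
--
--         if not ok:
--             continue
--
--         for r in range(n):
--             for c in range(m):
--                 if grid[r][c] == 1 and deg[r][c] != 2: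
--                     ok = False
--                     break
--                 if grid[r][c] == 0 and deg[r][c] != 0:
--                     ok = False
--                     break
--             if not ok:
--                 break
--
--         if ok:
--             ans += 1
--
--     return ans
-- ===== SOURCE B (Python) =====
-- from typing import List, Tuple
--
-- def brute_force_cycle_cover_count(grid: List[List[int]]) -> int:
--     """Backtracking over the edge list with incremental degrees and degree-cap pruning."""
--     n = len(grid)
--     m = len(grid[0]) if n else 0
--     edges = [((r, c), nb)
--              for r in range(n) for c in range(m) if grid[r][c] == 1
--              for nb in [(r, c + 1), (r + 1, c)]
--              if nb[0] < n and nb[1] < m and grid[nb[0]][nb[1]] == 1]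
--     deg = [[0] * m for _ in range(n)]
--
--     def good() -> bool:
--         return all(deg[r][c] == 2 if grid[r][c] == 1 else
--                    deg[r][c] == 0 if grid[r][c] == 0 else True
--                    for r in range(n) for c in range(m))
--
--     def count(i: int) -> int:
--         if i == len(edges):
--             return 1 if good() else 0
--         (ar, ac), (br, bc) = edges[i]
--         total = count(i + 1)
--         deg[ar][ac] += 1
--         deg[br][bc] += 1
--         if deg[ar][ac] <= 2 and deg[br][bc] <= 2:
--             total += count(i + 1)
--         deg[ar][ac] -= 1
--         deg[br][bc] -= 1
--         return total
--
--     return count(0)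
-- ===== Notes on version B (the rewrite author's own statement) =====
-- stated objective: alternative
-- what changed: A enumerates all 2^E edge bitmasks and rebuilds and validates a fresh degree grid for each mask; B counts by a backtracking recursion over the edge list that maintains the degree grid incrementally (bump/undo) and prunes a branch as soon as a cell's degree exceeds 2.
import Mathlib
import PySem

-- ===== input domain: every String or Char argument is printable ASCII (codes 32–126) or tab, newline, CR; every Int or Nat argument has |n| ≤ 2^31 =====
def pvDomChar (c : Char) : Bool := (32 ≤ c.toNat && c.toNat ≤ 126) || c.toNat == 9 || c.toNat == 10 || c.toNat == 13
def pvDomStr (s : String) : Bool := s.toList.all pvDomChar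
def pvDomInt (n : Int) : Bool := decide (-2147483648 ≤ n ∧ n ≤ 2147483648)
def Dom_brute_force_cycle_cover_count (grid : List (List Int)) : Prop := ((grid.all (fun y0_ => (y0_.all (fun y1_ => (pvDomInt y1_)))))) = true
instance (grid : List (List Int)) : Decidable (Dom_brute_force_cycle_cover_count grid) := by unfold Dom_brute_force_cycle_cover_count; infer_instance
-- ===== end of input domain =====

-- B replaces A's scan of all 2^E edge bitmasks (rebuilding the degree grid per mask) by a
-- backtracking recursion over the edge list with incremental degrees and degree-cap pruning.

-- ===== PORT A =====
-- grid[r][c] / deg[r][c]; indices are in range on every admitted input (Pre_), so the total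
-- pyGetD/pySetD forms are exact. Shared by both ports (both Pythons index the same way).
def pvCell (g : List (List Int)) (r c : Int) : Int :=
  PySem.List.pyGetD (PySem.List.pyGetD g r []) c 0

-- deg[r][c] += 1
def pvBump (deg : List (List Int)) (r c : Int) : List (List Int) :=
  PySem.List.pySetD deg r (PySem.List.pySetD (PySem.List.pyGetD deg r []) c (pvCell deg r c + 1))

-- (mask >> i) & 1
def pvBit (mask : Int) (i : Nat) : Int := PySem.Int.band (mask >>> i) 1

-- A's edge-building double loop with its two conditional appends
def edgesA (grid : List (List Int)) (n m : Int) : List ((Int × Int) × (Int × Int)) :=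
  (PySem.List.pyRange 0 n 1).foldl (fun acc r =>
    (PySem.List.pyRange 0 m 1).foldl (fun acc2 c =>
      if pvCell grid r c ≠ 1 then acc2
      else
        let acc3 := if c + 1 < m ∧ pvCell grid r (c + 1) = 1 then acc2 ++ [((r, c), (r, c + 1))] else acc2
        if r + 1 < n ∧ pvCell grid (r + 1) c = 1 then acc3 ++ [((r, c), (r + 1, c))] else acc3) acc) []

-- A's inner loop 'for i, (a, b) in enumerate(edges)' with the break on a degree > 2
def degLoopA : List ((Int × Int) × (Int × Int)) → Int → Nat → List (List Int) → List (List Int) × Bool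
  | [], _, _, deg => (deg, true)
  | (a, b) :: rest, mask, i, deg =>
    if pvBit mask i = 1 then
      let deg1 := pvBump deg a.1 a.2
      let deg2 := pvBump deg1 b.1 b.2
      if 2 < pvCell deg2 a.1 a.2 ∨ 2 < pvCell deg2 b.1 b.2 then (deg2, false)
      else degLoopA rest mask (i + 1) deg2
    else degLoopA rest mask (i + 1) deg

-- A's final nested check loops with their breaks
def checkColsA (grid deg : List (List Int)) (r : Int) : List Int → Bool
  | [] => true
  | c :: rest =>
    if pvCell grid r c = 1 ∧ pvCell deg r c ≠ 2 then false
    else if pvCell grid r c = 0 ∧ pvCell deg r c ≠ 0 then false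
    else checkColsA grid deg r rest

def checkRowsA (grid deg : List (List Int)) (m : Int) : List Int → Bool
  | [] => true
  | r :: rest =>
    if checkRowsA.go grid deg r m then checkRowsA grid deg m rest else false
where go (grid deg : List (List Int)) (r m : Int) : Bool := checkColsA grid deg r (PySem.List.pyRange 0 m 1)

def brute_force_cycle_cover_count (grid : List (List Int)) : Int :=
  let n : Int := grid.length
  let m : Int := if grid.length ≠ 0 then ((PySem.List.pyGetD grid 0 []).length : Int) else 0
  let edges := edgesA grid n m
  -- 1 << len(edges)
  (PySem.List.pyRange 0 ((1 <<< edges.length : Nat) : Int) 1).foldl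
    (fun ans mask =>
      let p := degLoopA edges mask 0 (List.replicate n.toNat (List.replicate m.toNat (0 : Int)))
      if p.2 then
        (if checkRowsA grid p.1 m (PySem.List.pyRange 0 n 1) then ans + 1 else ans)
      else ans)
    0

-- ===== PORT B =====
-- B's edge comprehension
def edgesB (grid : List (List Int)) (n m : Int) : List ((Int × Int) × (Int × Int)) :=
  (PySem.List.pyRange 0 n 1).flatMap fun r =>
    (PySem.List.pyRange 0 m 1).flatMap fun c =>
      if pvCell grid r c = 1 then
        ([(r, c + 1), (r + 1, c)].filter fun nb =>
            decide (nb.1 < n ∧ nb.2 < m ∧ pvCell grid nb.1 nb.2 = 1)).map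
          (fun nb => ((r, c), nb))
      else []

-- B's 'good()' all-comprehension
def goodB (grid deg : List (List Int)) (n m : Int) : Bool :=
  (PySem.List.pyRange 0 n 1).all fun r =>
    (PySem.List.pyRange 0 m 1).all fun c =>
      if pvCell grid r c = 1 then pvCell deg r c == 2
      else if pvCell grid r c = 0 then pvCell deg r c == 0
      else true

-- B's 'count(i)' backtracking recursion (the in-place bump/undo becomes passing deg2 to the call)
def dfsB (grid : List (List Int)) (n m : Int) : List ((Int × Int) × (Int × Int)) → List (List Int) → Int
  | [], deg => if goodB grid deg n m then 1 else 0
  | (a, b) :: rest, deg =>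
    let total := dfsB grid n m rest deg
    let deg1 := pvBump deg a.1 a.2
    let deg2 := pvBump deg1 b.1 b.2
    if pvCell deg2 a.1 a.2 ≤ 2 ∧ pvCell deg2 b.1 b.2 ≤ 2 then total + dfsB grid n m rest deg2
    else total

def brute_force_cycle_cover_count_alt (grid : List (List Int)) : Int :=
  let n : Int := grid.length
  let m : Int := if grid.length ≠ 0 then ((PySem.List.pyGetD grid 0 []).length : Int) else 0
  dfsB grid n m (edgesB grid n m) (List.replicate n.toNat (List.replicate m.toNat (0 : Int)))

-- ===== PRECONDITION & SPEC =====
-- Pre_ excludes exactly the ragged grids on which Python A raises IndexError: some row is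
-- shorter than the first row (A indexes every row at all columns 0..len(grid[0])-1).
def Pre_brute_force_cycle_cover_count (grid : List (List Int)) : Prop :=
  ∀ row ∈ grid, (grid.headD []).length ≤ row.length
instance (grid : List (List Int)) : Decidable (Pre_brute_force_cycle_cover_count grid) := by
  unfold Pre_brute_force_cycle_cover_count; infer_instance
def pvWitness_brute_force_cycle_cover_count : List (List Int) := [[1, 1], [1, 1]]

def Spec_brute_force_cycle_cover_count (grid : List (List Int)) (out : Int) : Prop := out = brute_force_cycle_cover_count_alt grid
instance (grid : List (List Int)) (out : Int) : Decidable (Spec_brute_force_cycle_cover_count grid out) := by unfold Spec_brute_force_cycle_cover_count; infer_instance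

-- ===== CLAIM (what is proved, stated in full; the proofs are below) =====
def Claim_equal_brute_force_cycle_cover_count : Prop := ∀ (grid : List (List Int)), Dom_brute_force_cycle_cover_count grid → Pre_brute_force_cycle_cover_count grid → Spec_brute_force_cycle_cover_count grid (brute_force_cycle_cover_count grid)

-- ===== LEMMAS AND PROOFS =====

-- A's column loop with break is the short-circuit 'all' of B's per-cell test
lemma checkColsA_eq_all (g d : List (List Int)) (r : Int) (cs : List Int) :
    checkColsA g d r cs = cs.all (fun c =>
      if pvCell g r c = 1 then pvCell d r c == 2
      else if pvCell g r c = 0 then pvCell d r c == 0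
      else true) := by
  induction cs with
  | nil => rfl
  | cons c rest ih =>
    simp only [checkColsA, List.all_cons, ih]
    by_cases h1 : pvCell g r c = 1 <;> by_cases h2 : pvCell g r c = 0 <;>
      by_cases h3 : pvCell d r c = 2 <;> by_cases h4 : pvCell d r c = 0 <;>
        simp [h1, h2, h3, h4]

-- A's row loop with break is B's goodB
lemma checkRowsA_eq_goodB (g d : List (List Int)) (n m : Int) :
    checkRowsA g d m (PySem.List.pyRange 0 n 1) = goodB g d n m := by
  unfold goodB
  generalize PySem.List.pyRange 0 n 1 = rs
  induction rs with
  | nil => rfl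
  | cons r rest ih =>
    simp only [checkRowsA, checkRowsA.go, List.all_cons, ih]
    rw [show ∀ (x y : Bool), (if x = true then y else false) = (x && y) from by decide,
      checkColsA_eq_all]

lemma pvBit_natCast (mk : Nat) (i : Nat) : pvBit ((mk : Nat) : Int) i = (((mk >>> i) &&& 1 : Nat) : Int) := by
  unfold pvBit
  rw [show ((mk : Int) >>> i) = ((mk >>> i : Nat) : Int) from rfl]
  exact_mod_cast PySem.Int.band_natCast (mk >>> i) 1

lemma pvBit_even (j : Nat) : pvBit (((2 * j : Nat) : Int)) 0 = 0 := by
  rw [pvBit_natCast]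
  norm_num [Nat.shiftRight_zero, Nat.and_one_is_mod, Nat.mul_mod_right]

lemma pvBit_odd (j : Nat) : pvBit (((2 * j + 1 : Nat) : Int)) 0 = 1 := by
  rw [pvBit_natCast]
  norm_num [Nat.shiftRight_zero, Nat.and_one_is_mod, Nat.add_mul_mod_self_left]

-- shifting the running index in A's enumerate loop = halving the mask
lemma degLoopA_shift (es : List ((Int × Int) × (Int × Int))) :
    ∀ (mk i : Nat) (deg : List (List Int)),
      degLoopA es ((mk : Nat) : Int) (i + 1) deg = degLoopA es (((mk / 2 : Nat)) : Int) i deg := by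
  intro mk i deg
  induction es generalizing i deg with
  | nil => rfl
  | cons e rest ih =>
    obtain ⟨a, b⟩ := e
    have hb : pvBit ((mk : Nat) : Int) (i + 1) = pvBit (((mk / 2 : Nat)) : Int) i := by
      rw [pvBit_natCast, pvBit_natCast, Nat.shiftRight_succ_inside]
    simp only [degLoopA, hb]
    split_ifs <;> first | rfl | apply ih

-- splitting a sum over range(2*N) by the parity of the index
lemma double_sum (f : Nat → Int) (N : Nat) :
    ((List.range (2 * N)).map f).sum
      = ((List.range N).map (fun j => f (2 * j) + f (2 * j + 1))).sum := by
  induction N with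
  | zero => rfl
  | succ n ih =>
    rw [show 2 * (n + 1) = (2 * n + 1) + 1 by ring, List.range_succ, List.range_succ,
      List.range_succ]
    simp only [List.map_append, List.sum_append, List.map_cons, List.map_nil, List.sum_cons,
      List.sum_nil, ih]
    ring

-- A's enumerate loop on an even / odd mask, expressed on the halved mask
lemma degLoopA_cons_even (a b : Int × Int) (rest : List ((Int × Int) × (Int × Int)))
    (j : Nat) (deg : List (List Int)) :
    degLoopA ((a, b) :: rest) ((2 * j : Nat) : Int) 0 deg = degLoopA rest ((j : Nat) : Int) 0 deg := by
  have h0 : ¬ (pvBit ((2 * j : Nat) : Int) 0 = 1) := by rw [pvBit_even]; norm_num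
  simp only [degLoopA, if_neg h0]
  rw [degLoopA_shift, show ((2 * j) / 2 : Nat) = j from by omega]

lemma degLoopA_cons_odd (a b : Int × Int) (rest : List ((Int × Int) × (Int × Int)))
    (j : Nat) (deg : List (List Int)) :
    degLoopA ((a, b) :: rest) ((2 * j + 1 : Nat) : Int) 0 deg =
      (if 2 < pvCell (pvBump (pvBump deg a.1 a.2) b.1 b.2) a.1 a.2 ∨
           2 < pvCell (pvBump (pvBump deg a.1 a.2) b.1 b.2) b.1 b.2
       then ((pvBump (pvBump deg a.1 a.2) b.1 b.2), false)
       else degLoopA rest ((j : Nat) : Int) 0 (pvBump (pvBump deg a.1 a.2) b.1 b.2)) := by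
  have h0 : pvBit ((2 * j + 1 : Nat) : Int) 0 = 1 := pvBit_odd j
  simp only [degLoopA, h0, if_pos]
  rw [degLoopA_shift, show ((2 * j + 1) / 2 : Nat) = j from by omega]

-- the mask-indexed 0/1 contribution of A
def pvF (grid : List (List Int)) (n m : Int) (es : List ((Int × Int) × (Int × Int)))
    (deg : List (List Int)) (j : Nat) : Int :=
  let p := degLoopA es (j : Int) 0 deg
  if p.2 && goodB grid p.1 n m then 1 else 0

-- MAIN INVARIANT: the sum of A's per-mask contributions over all 2^|es| masks is B's recursion
lemma sum_pvF_eq_dfsB (grid : List (List Int)) (n m : Int) :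
    ∀ (es : List ((Int × Int) × (Int × Int))) (deg : List (List Int)),
      ((List.range (2 ^ es.length)).map (pvF grid n m es deg)).sum = dfsB grid n m es deg := by
  intro es
  induction es with
  | nil =>
    intro deg
    simp [pvF, degLoopA, dfsB, List.range_one]
  | cons e rest ih =>
    intro deg
    obtain ⟨a, b⟩ := e
    have hlen : 2 ^ ((a, b) :: rest).length = 2 * 2 ^ rest.length := by
      simp [List.length_cons]; ring
    rw [hlen, double_sum]
    have h1 : ∀ j : Nat, pvF grid n m ((a, b) :: rest) deg (2 * j) = pvF grid n m rest deg j := by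
      intro j
      unfold pvF
      rw [degLoopA_cons_even]
    by_cases hc : pvCell (pvBump (pvBump deg a.1 a.2) b.1 b.2) a.1 a.2 ≤ 2 ∧
        pvCell (pvBump (pvBump deg a.1 a.2) b.1 b.2) b.1 b.2 ≤ 2
    · have hng : ¬ (2 < pvCell (pvBump (pvBump deg a.1 a.2) b.1 b.2) a.1 a.2 ∨
          2 < pvCell (pvBump (pvBump deg a.1 a.2) b.1 b.2) b.1 b.2) := by omega
      have h2 : ∀ j : Nat, pvF grid n m ((a, b) :: rest) deg (2 * j + 1)
          = pvF grid n m rest (pvBump (pvBump deg a.1 a.2) b.1 b.2) j := by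
        intro j
        unfold pvF
        rw [degLoopA_cons_odd, if_neg hng]
      simp only [h1, h2]
      rw [PySem.List.sum_map_add_int, ih, ih]
      simp [dfsB, hc]
    · have hg : 2 < pvCell (pvBump (pvBump deg a.1 a.2) b.1 b.2) a.1 a.2 ∨
          2 < pvCell (pvBump (pvBump deg a.1 a.2) b.1 b.2) b.1 b.2 := by omega
      have h2 : ∀ j : Nat, pvF grid n m ((a, b) :: rest) deg (2 * j + 1) = 0 := by
        intro j
        unfold pvF
        rw [degLoopA_cons_odd, if_pos hg]
        simp
      simp only [h1, h2, add_zero]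
      rw [ih]
      simp [dfsB, hc]

-- the two edge builders produce the same list
lemma edgesA_eq_edgesB (grid : List (List Int)) (n m : Int) :
    edgesA grid n m = edgesB grid n m := by
  unfold edgesA edgesB
  have hinner : ∀ (acc : List ((Int × Int) × (Int × Int))) (r : Int),
      (PySem.List.pyRange 0 m 1).foldl (fun acc2 c =>
        if pvCell grid r c ≠ 1 then acc2
        else
          let acc3 := if c + 1 < m ∧ pvCell grid r (c + 1) = 1 then acc2 ++ [((r, c), (r, c + 1))] else acc2
          if r + 1 < n ∧ pvCell grid (r + 1) c = 1 then acc3 ++ [((r, c), (r + 1, c))] else acc3) acc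
      = acc ++ (PySem.List.pyRange 0 m 1).flatMap (fun c =>
          if pvCell grid r c = 1 then
            (if c + 1 < m ∧ pvCell grid r (c + 1) = 1 then [((r, c), (r, c + 1))] else []) ++
            (if r + 1 < n ∧ pvCell grid (r + 1) c = 1 then [((r, c), (r + 1, c))] else [])
          else []) := by
    intro acc r
    rw [show (fun (acc2 : List ((Int × Int) × (Int × Int))) (c : Int) =>
        if pvCell grid r c ≠ 1 then acc2
        else
          let acc3 := if c + 1 < m ∧ pvCell grid r (c + 1) = 1 then acc2 ++ [((r, c), (r, c + 1))] else acc2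
          if r + 1 < n ∧ pvCell grid (r + 1) c = 1 then acc3 ++ [((r, c), (r + 1, c))] else acc3)
      = (fun acc2 c => acc2 ++ (if pvCell grid r c = 1 then
            (if c + 1 < m ∧ pvCell grid r (c + 1) = 1 then [((r, c), (r, c + 1))] else []) ++
            (if r + 1 < n ∧ pvCell grid (r + 1) c = 1 then [((r, c), (r + 1, c))] else [])
          else [])) from funext fun acc2 => funext fun c => by
        by_cases h1 : pvCell grid r c = 1 <;>
          by_cases h2 : c + 1 < m ∧ pvCell grid r (c + 1) = 1 <;>
            by_cases h3 : r + 1 < n ∧ pvCell grid (r + 1) c = 1 <;>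
              simp [h1, h2, h3]]
    exact PySem.List.foldl_append_eq_flatMap _ _ _
  rw [show (fun (acc : List ((Int × Int) × (Int × Int))) (r : Int) =>
      (PySem.List.pyRange 0 m 1).foldl (fun acc2 c =>
        if pvCell grid r c ≠ 1 then acc2
        else
          let acc3 := if c + 1 < m ∧ pvCell grid r (c + 1) = 1 then acc2 ++ [((r, c), (r, c + 1))] else acc2
          if r + 1 < n ∧ pvCell grid (r + 1) c = 1 then acc3 ++ [((r, c), (r + 1, c))] else acc3) acc)
    = (fun acc r => acc ++ (PySem.List.pyRange 0 m 1).flatMap (fun c =>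
          if pvCell grid r c = 1 then
            (if c + 1 < m ∧ pvCell grid r (c + 1) = 1 then [((r, c), (r, c + 1))] else []) ++
            (if r + 1 < n ∧ pvCell grid (r + 1) c = 1 then [((r, c), (r + 1, c))] else [])
          else [])) from funext fun acc => funext fun r => hinner acc r,
    PySem.List.foldl_append_eq_flatMap _ _ _, List.nil_append]
  rw [List.flatMap_def, List.flatMap_def]
  congr 1
  apply List.map_congr_left
  intro r hr
  rw [List.flatMap_def, List.flatMap_def]
  congr 1
  apply List.map_congr_left
  intro c hc
  have hrn : r < n := (PySem.List.mem_pyRange_one.mp hr).2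
  have hcm : c < m := (PySem.List.mem_pyRange_one.mp hc).2
  by_cases h1 : pvCell grid r c = 1
  · by_cases h2 : c + 1 < m ∧ pvCell grid r (c + 1) = 1 <;>
      by_cases h3 : r + 1 < n ∧ pvCell grid (r + 1) c = 1 <;>
        simp [h1, h2, h3, List.filter, hrn, hcm]
  · simp [h1]

-- ===== VERDICT (by name: the statement is the Claim_ definition above) =====
theorem brute_force_cycle_cover_count_spec : Claim_equal_brute_force_cycle_cover_count := by
  intro grid _ _
  unfold Spec_brute_force_cycle_cover_count
  show brute_force_cycle_cover_count grid = brute_force_cycle_cover_count_alt grid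
  dsimp only [brute_force_cycle_cover_count, brute_force_cycle_cover_count_alt]
  rw [← edgesA_eq_edgesB]
  set n : Int := (grid.length : Int) with hn
  set m : Int := (if grid.length ≠ 0 then ((PySem.List.pyGetD grid 0 []).length : Int) else 0) with hm
  set D0 : List (List Int) := List.replicate n.toNat (List.replicate m.toNat (0 : Int)) with hD0
  set E : List ((Int × Int) × (Int × Int)) := edgesA grid n m with hE
  rw [show (fun (ans mask : Int) =>
      if (degLoopA E mask 0 D0).2 = true then
        (if checkRowsA grid (degLoopA E mask 0 D0).1 m (PySem.List.pyRange 0 n 1) = true then ans + 1 else ans)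
      else ans)
    = (fun ans mask => ans +
        (if ((degLoopA E mask 0 D0).2 && goodB grid (degLoopA E mask 0 D0).1 n m) = true then (1 : Int) else 0)) from
      funext fun ans => funext fun mask => by
        rw [checkRowsA_eq_goodB]
        by_cases hok : (degLoopA E mask 0 D0).2 = true <;>
          by_cases hgd : goodB grid (degLoopA E mask 0 D0).1 n m = true <;>
            simp [hok, hgd]]
  rw [PySem.List.foldl_add, PySem.List.pyRange_one]
  rw [show (((1 <<< E.length : Nat) : Int) - 0).toNat = 2 ^ E.length from by
    rw [sub_zero, Int.toNat_natCast, Nat.one_shiftLeft]]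
  rw [List.map_map]
  rw [show ((fun mask : Int =>
      if ((degLoopA E mask 0 D0).2 && goodB grid (degLoopA E mask 0 D0).1 n m) = true then (1 : Int) else 0)
      ∘ (fun k : Nat => (0 : Int) + ↑k)) = pvF grid n m E D0 from
    funext fun k => by simp [pvF, Function.comp]]
  rw [sum_pvF_eq_dfsB]
  simp
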